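-- pv_equiv track=rewrite | github.com/mark011062/Austin-Pet-Adoption | app.py | default_breed_index
-- ===== SOURCE A (Python) =====
-- def default_breed_index(breed_options: list[str], animal_type: str) -> int:
--     if not breed_options:
--         return 0
--
--     if animal_type == "Dog":
--         preferred = [
--             "Labrador Retriever",
--             "German Shepherd",
--             "Chihuahua",
--             "Pomeranian",
--             "Pit Bull Mix",
--         ]
--     else:
--         preferred = [
--             "Domestic Shorthair",
--             "Domestic Longhair",
--             "Siamese",
--         ]
--
--     for option in preferred:
--         if option in breed_options:
--             return breed_options.index(option)
--
--     return 0
-- ===== SOURCE B (Python) =====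
-- def default_breed_index(breed_options: list[str], animal_type: str) -> int:
--     if not breed_options:
--         return 0
--
--     if animal_type == "Dog":
--         preferred = [
--             "Labrador Retriever",
--             "German Shepherd",
--             "Chihuahua",
--             "Pomeranian",
--             "Pit Bull Mix",
--         ]
--     else:
--         preferred = [
--             "Domestic Shorthair",
--             "Domestic Longhair",
--             "Siamese",
--         ]
--
--     rank = {breed: r for r, breed in enumerate(preferred)}
--
--     best_rank = None
--     best_index = 0
--     for i, option in enumerate(breed_options):
--         r = rank.get(option)
--         if r is not None and (best_rank is None or r < best_rank):
--             best_rank = r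
--             best_index = i
--     return best_index
-- ===== Notes on version B (the rewrite author's own statement) =====
-- stated objective: alternative
-- what changed: Replaces A's loop over the preferred list with repeated 'in'/' .index' scans of breed_options by a rank table built from the preferred list and a single best-rank pass over breed_options (first occurrence wins on equal breed, strict improvement keeps duplicates stable).
import Mathlib
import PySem

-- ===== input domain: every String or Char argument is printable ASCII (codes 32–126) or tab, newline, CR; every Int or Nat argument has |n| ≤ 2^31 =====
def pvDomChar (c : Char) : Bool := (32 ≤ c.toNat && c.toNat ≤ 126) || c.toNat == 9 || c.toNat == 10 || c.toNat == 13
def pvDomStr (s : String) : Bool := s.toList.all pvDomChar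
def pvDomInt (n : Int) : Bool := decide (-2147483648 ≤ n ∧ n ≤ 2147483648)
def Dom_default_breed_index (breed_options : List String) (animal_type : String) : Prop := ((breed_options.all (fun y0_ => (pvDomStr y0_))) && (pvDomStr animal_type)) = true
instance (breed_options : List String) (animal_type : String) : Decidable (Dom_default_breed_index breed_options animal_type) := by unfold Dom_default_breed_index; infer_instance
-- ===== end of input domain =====

-- B replaces A's scan over `preferred` with repeated `in`/`.index` scans of the options by a rank
-- table over `preferred` and a single best-rank pass over the options (alternative decomposition).

-- the two literal preference lists of the Python source (shared by both ports)
def prefDog : List String :=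
  ["Labrador Retriever", "German Shepherd", "Chihuahua", "Pomeranian", "Pit Bull Mix"]
def prefCat : List String :=
  ["Domestic Shorthair", "Domestic Longhair", "Siamese"]

-- ===== PORT A =====
-- the `for option in preferred: if option in breed_options: return breed_options.index(option)` loop
-- (`.index` is guarded by `in`, so the `none` branch of index? is unreachable)
def aLoop (pref : List String) (breed_options : List String) : Int :=
  match pref with
  | [] => 0
  | option :: rest =>
      if breed_options.contains option then
        match PySem.List.index? breed_options option with
        | some k => (k : Int)
        | none => 0
      else aLoop rest breed_options

def default_breed_index (breed_options : List String) (animal_type : String) : Int :=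
  if breed_options = [] then 0
  else
    let preferred := if animal_type == "Dog" then prefDog else prefCat
    aLoop preferred breed_options

-- ===== PORT B =====
-- rank = {breed: r for r, breed in enumerate(preferred)}
def rankOf (pref : List String) : PySem.Dict String Int :=
  (PySem.List.enumerate pref).foldl (fun d p => d.insert p.2 p.1) PySem.Dict.empty

-- one iteration of the best-rank loop; state = (best_rank, best_index)
def bStep (rank : PySem.Dict String Int) (s : Option Int × Int) (p : Int × String) : Option Int × Int :=
  match rank.get? p.2 with
  | none => s
  | some r =>
      match s.1 with
      | none => (some r, p.1)
      | some br => if r < br then (some r, p.1) else s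

def default_breed_index_alt (breed_options : List String) (animal_type : String) : Int :=
  if breed_options = [] then 0
  else
    let preferred := if animal_type == "Dog" then prefDog else prefCat
    let rank := rankOf preferred
    let s := (PySem.List.enumerate breed_options).foldl (bStep rank) (none, 0)
    s.2

-- ===== PRECONDITION & SPEC =====
def Spec_default_breed_index (breed_options : List String) (animal_type : String) (out : Int) : Prop := out = default_breed_index_alt breed_options animal_type
instance (breed_options : List String) (animal_type : String) (out : Int) : Decidable (Spec_default_breed_index breed_options animal_type out) := by unfold Spec_default_breed_index; infer_instance

-- ===== CLAIM (what is proved, stated in full; the proofs are below) =====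
def Claim_equal_default_breed_index : Prop := ∀ (breed_options : List String) (animal_type : String), Dom_default_breed_index breed_options animal_type → Spec_default_breed_index breed_options animal_type (default_breed_index breed_options animal_type)

-- ===== LEMMAS AND PROOFS =====

-- find? only looks at the predicate's values on the list's elements
theorem find?_congr_mem {p q : String → Bool} {l : List String}
    (h : ∀ x ∈ l, p x = q x) : List.find? p l = List.find? q l := by
  induction l with
  | nil => rfl
  | cons a t ih => simp only [List.find?_cons, h a (by simp)]; split <;> simp_all

-- specification of the state of B's loop after consuming `opts`
def specState (pref opts : List String) : Option Int × Int :=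
  match pref.find? (fun p => opts.contains p) with
  | some p => ((PySem.List.index? pref p).map (fun n => (n : Int)),
               (((PySem.List.index? opts p).getD 0 : Nat) : Int))
  | none => (none, 0)

-- the rank dict looks up the index in `pref` (for duplicate-free `pref`)
theorem rankOf_get? (pref : List String) (hnd : pref.Nodup) (o : String) :
    (rankOf pref).get? o = (PySem.List.index? pref o).map (fun n => (n : Int)) := by
  induction pref using List.reverseRecOn with
  | nil => simp [rankOf, PySem.List.enumerate_nil, PySem.Dict.empty, PySem.Dict.get?,
      PySem.List.index?]
  | append_singleton pref p ih =>
    have hnp : p ∉ pref := by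
      rw [List.nodup_append] at hnd
      intro hc; exact hnd.2.2 p hc p (by simp) rfl
    have hpref : pref.Nodup := (List.nodup_append.mp hnd).1
    have hrank : rankOf (pref ++ [p]) = (rankOf pref).insert p (pref.length : Int) := by
      simp [rankOf, PySem.List.enumerate_append, List.foldl_append,
        PySem.List.enumerate_cons, PySem.List.enumerate_nil]
    rw [hrank]
    by_cases ho : o = p
    · subst ho
      rw [PySem.Dict.get?_insert_self, PySem.List.index?_append_singleton_self _ _ hnp]
      rfl
    · rw [PySem.Dict.get?_insert_of_ne _ _ ho, ih hpref]
      have : PySem.List.index? (pref ++ [p]) o = PySem.List.index? pref o := by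
        by_cases hm : o ∈ pref
        · exact PySem.List.index?_append_of_mem _ hm
        · rw [(PySem.List.index?_eq_none_iff _ _).mpr hm,
            (PySem.List.index?_eq_none_iff _ _).mpr (by simp [hm, ho])]
      rw [this]

theorem aLoop_eq (pref opts : List String) :
    aLoop pref opts = (specState pref opts).2 := by
  induction pref with
  | nil => simp [aLoop, specState]
  | cons p rest ih =>
    by_cases h : p ∈ opts
    · cases hI : List.idxOf? p opts with
      | none =>
        have : p ∉ opts := (PySem.List.index?_eq_none_iff opts p).mp (by simpa using hI)
        exact absurd h this
      | some k => simp [aLoop, specState, h, hI]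
    · have hc : opts.contains p = false := by simpa using h
      have ha : aLoop (p :: rest) opts = aLoop rest opts := by rw [aLoop, hc]; simp
      rw [ha, ih]
      unfold specState
      simp only [List.find?_cons, hc]
      cases hF : rest.find? (fun q => opts.contains q) with
      | none => simp
      | some q => simp

theorem fold_spec (pref : List String) (hnd : pref.Nodup) (opts : List String) :
    (PySem.List.enumerate opts).foldl (bStep (rankOf pref)) (none, 0) = specState pref opts := by
  induction opts using List.reverseRecOn with
  | nil =>
    rw [specState]
    have h0 : pref.find? (fun p => ([] : List String).contains p) = none := by
      rw [List.find?_eq_none]; intro x _; simp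
    rw [h0, PySem.List.enumerate_nil, List.foldl_nil]
  | append_singleton opts o ih =>
    rw [PySem.List.enumerate_append, List.foldl_append, ih]
    have henum : PySem.List.enumerate [o] ((0 : Int) + opts.length) = [((opts.length : Int), o)] := by
      simp [PySem.List.enumerate_cons, PySem.List.enumerate_nil]
    rw [henum]
    simp only [List.foldl_cons, List.foldl_nil]
    cases hro : PySem.List.index? pref o with
    | none =>
      -- o is not a preferred breed: the step leaves the state unchanged and find? is unchanged
      have ho : o ∉ pref := (PySem.List.index?_eq_none_iff _ _).mp hro
      have hf : pref.find? (fun p => (opts ++ [o]).contains p)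
          = pref.find? (fun p => opts.contains p) := by
        apply find?_congr_mem
        intro x hx
        have hxo : x ≠ o := fun h => ho (h ▸ hx)
        by_cases hxm : x ∈ opts <;> simp [hxm, hxo]
      have hro' : List.idxOf? o pref = none := by simpa using hro
      rw [specState, specState, hf]
      cases hF : pref.find? (fun p => opts.contains p) with
      | none => simp [bStep, rankOf_get? pref hnd, hro']
      | some q =>
        have hq : q ∈ opts := by simpa using List.find?_some hF
        have hq' : List.idxOf? q (opts ++ [o]) = List.idxOf? q opts := by
          simpa using PySem.List.index?_append_of_mem (l := opts) [o] hq
        simp [bStep, rankOf_get? pref hnd, hro', hq']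
    | some r =>
      have homem : o ∈ pref := by
        by_contra hc
        rw [(PySem.List.index?_eq_none_iff pref o).mpr hc] at hro
        cases hro
      cases hF : pref.find? (fun p => opts.contains p) with
      | none =>
        -- nothing preferred seen yet: o becomes the best
        have hall : ∀ x ∈ pref, x ∉ opts := by
          rw [List.find?_eq_none] at hF
          intro x hx; simpa using hF x hx
        have honot : o ∉ opts := hall o homem
        obtain ⟨pre, suf, hdec, hlen, hopre⟩ := (PySem.List.index?_eq_some_iff _ _ _).mp hro
        have hf' : pref.find? (fun p => (opts ++ [o]).contains p) = some o := by
          rw [hdec, List.find?_append]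
          have h1 : pre.find? (fun p => (opts ++ [o]).contains p) = none := by
            rw [List.find?_eq_none]
            intro x hx
            have hxo : x ≠ o := fun h => hopre (h ▸ hx)
            have hxopts : x ∉ opts := hall x (hdec ▸ List.mem_append_left _ hx)
            simp [hxopts, hxo]
          rw [h1]
          simp
        have hro' : List.idxOf? o pref = some r := by simpa using hro
        have h2' : List.idxOf? o (opts ++ [o]) = some opts.length := by
          simpa using PySem.List.index?_append_singleton_self opts o honot
        rw [specState, specState, hF, hf']
        simp [bStep, rankOf_get? pref hnd, hro', h2']
      | some p =>
        have hpmem : p ∈ opts := by simpa using List.find?_some hF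
        obtain ⟨hPt, l1, l2, hdec, hl1⟩ := List.find?_eq_some_iff_append.mp hF
        have hl1opts : ∀ x ∈ l1, x ∉ opts := by
          intro x hx; have := hl1 x hx; simpa using this
        have h'' := hdec ▸ hnd
        rw [List.nodup_append] at h''
        have hpnotl1 : p ∉ l1 := fun hc => h''.2.2 p hc p (by simp) rfl
        have hrp : PySem.List.index? pref p = some l1.length :=
          (PySem.List.index?_eq_some_iff _ _ _).mpr ⟨l1, l2, hdec, rfl, hpnotl1⟩
        obtain ⟨preo, sufo, hdeco, hleno, honpre⟩ := (PySem.List.index?_eq_some_iff _ _ _).mp hro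
        have hp1 : preo <+: pref := ⟨o :: sufo, hdeco.symm⟩
        have hp2 : l1 <+: pref := ⟨p :: l2, hdec.symm⟩
        by_cases hlt : r < l1.length
        · -- o outranks p: the step updates, and o is the new first preferred breed
          have hpre_l1 : preo <+: l1 :=
            List.prefix_of_prefix_length_le hp1 hp2 (by omega)
          have hol1 : o ∈ l1 := by
            obtain ⟨hk, hgo, -⟩ := PySem.List.getElem_of_index?_eq_some hro
            have h1 : l1[r]'hlt = pref[r]'hk := List.IsPrefix.getElem hp2 hlt
            have h2 : l1[r]'hlt = o := by rw [h1, hgo]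
            exact h2 ▸ List.getElem_mem hlt
          have honot : o ∉ opts := hl1opts o hol1
          have hf' : pref.find? (fun p => (opts ++ [o]).contains p) = some o := by
            rw [hdeco, List.find?_append]
            have h1 : preo.find? (fun p => (opts ++ [o]).contains p) = none := by
              rw [List.find?_eq_none]
              intro x hx
              have hxo : x ≠ o := fun h => honpre (h ▸ hx)
              have hxopts : x ∉ opts := hl1opts x (hpre_l1.subset hx)
              simp [hxopts, hxo]
            rw [h1]
            simp
          have hro' : List.idxOf? o pref = some r := by simpa using hro
          have hrp' : List.idxOf? p pref = some l1.length := by simpa using hrp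
          have h2' : List.idxOf? o (opts ++ [o]) = some opts.length := by
            simpa using PySem.List.index?_append_singleton_self opts o honot
          rw [specState, specState, hF, hf']
          simp [bStep, rankOf_get? pref hnd, hro', hrp', h2', Nat.cast_lt, hlt]
        · -- p keeps the best rank: the step leaves the state, and p stays first
          have hl1_pre : l1 <+: preo :=
            List.prefix_of_prefix_length_le hp2 hp1 (by omega)
          have hf' : pref.find? (fun p => (opts ++ [o]).contains p) = some p := by
            rw [hdec, List.find?_append]
            have h1 : l1.find? (fun p => (opts ++ [o]).contains p) = none := by
              rw [List.find?_eq_none]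
              intro x hx
              have hxo : x ≠ o := fun h => honpre (hl1_pre.subset (h ▸ hx))
              have hxopts : x ∉ opts := hl1opts x hx
              simp [hxopts, hxo]
            rw [h1]
            simp [hpmem]
          have hro' : List.idxOf? o pref = some r := by simpa using hro
          have hrp' : List.idxOf? p pref = some l1.length := by simpa using hrp
          have hp' : List.idxOf? p (opts ++ [o]) = List.idxOf? p opts := by
            simpa using PySem.List.index?_append_of_mem (l := opts) [o] hpmem
          rw [specState, specState, hF, hf']
          simp [bStep, rankOf_get? pref hnd, hro', hrp', hp', Nat.cast_lt, hlt]

-- ===== VERDICT (by name: the statement is the Claim_ definition above) =====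
theorem default_breed_index_spec : Claim_equal_default_breed_index := by
  intro breed_options animal_type _
  unfold Spec_default_breed_index default_breed_index default_breed_index_alt
  by_cases h : breed_options = [] <;> simp [h]
  have hnd : (if animal_type = "Dog" then prefDog else prefCat).Nodup := by
    split <;> decide
  rw [fold_spec _ hnd, aLoop_eq]
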